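-- pv_equiv track=rewrite | github.com/Putrinindiaa/facedetect | script/compute_nb_of_features.py | compute_nb_of_features
-- ===== SOURCE A (Python) =====
-- def compute_nb_of_features(window_w, window_h):
--     nb_of_features = 0
--     for block_w in range(3, window_w, 3):
--         for block_h in range(3, window_h, 3):
--             for offset_x in range(window_w - block_w + 1):
--                 for offset_y in range(window_h - block_h + 1):
--                     nb_of_features += 1
--     return nb_of_features
-- ===== SOURCE B (Python) =====
-- def compute_nb_of_features(window_w, window_h):
--     # The nested count factorizes: total = S(window_w) * S(window_h),
--     # where S(w) = sum over block sizes b in range(3, w, 3) of (w - b + 1).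
--     def s(w):
--         if w <= 3:
--             return 0
--         m = (w - 1) // 3          # number of block sizes 3, 6, ..., 3*m (< w)
--         return m * (w + 1) - 3 * m * (m + 1) // 2
--     return s(window_w) * s(window_h)
-- ===== Notes on version B (the rewrite author's own statement) =====
-- stated objective: faster
-- what changed: Replaced the four nested counting loops by a closed-form product of two arithmetic-series sums, one per dimension.
import Mathlib
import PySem

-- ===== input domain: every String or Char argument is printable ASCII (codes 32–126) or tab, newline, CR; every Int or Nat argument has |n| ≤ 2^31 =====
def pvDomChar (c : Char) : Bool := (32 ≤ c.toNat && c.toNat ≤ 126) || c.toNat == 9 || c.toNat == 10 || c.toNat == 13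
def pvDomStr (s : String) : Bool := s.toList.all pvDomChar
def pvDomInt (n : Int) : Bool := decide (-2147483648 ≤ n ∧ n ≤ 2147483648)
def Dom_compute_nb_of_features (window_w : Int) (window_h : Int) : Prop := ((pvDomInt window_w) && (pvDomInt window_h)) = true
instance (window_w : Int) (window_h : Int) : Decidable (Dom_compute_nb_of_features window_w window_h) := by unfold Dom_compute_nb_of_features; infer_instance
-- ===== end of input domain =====

-- B replaces A's four nested counting loops by a closed-form product of two arithmetic-series sums (objective: faster, O(1) vs O(W^2 H^2)).

-- ===== PORT A =====
def compute_nb_of_features (window_w : Int) (window_h : Int) : Int :=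
  (PySem.List.pyRange 3 window_w 3).foldl (fun acc block_w =>
    (PySem.List.pyRange 3 window_h 3).foldl (fun acc block_h =>
      (PySem.List.pyRange 0 (window_w - block_w + 1) 1).foldl (fun acc _offset_x =>
        (PySem.List.pyRange 0 (window_h - block_h + 1) 1).foldl (fun acc _offset_y =>
          acc + 1) acc) acc) acc) 0

-- ===== PORT B =====
def pvSeriesSum (w : Int) : Int :=
  if w ≤ 3 then 0
  else
    let m := PySem.Int.floordiv (w - 1) 3
    m * (w + 1) - PySem.Int.floordiv (3 * m * (m + 1)) 2

def compute_nb_of_features_alt (window_w : Int) (window_h : Int) : Int :=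
  pvSeriesSum window_w * pvSeriesSum window_h

-- ===== PRECONDITION & SPEC =====
def Spec_compute_nb_of_features (window_w : Int) (window_h : Int) (out : Int) : Prop := out = compute_nb_of_features_alt window_w window_h
instance (window_w : Int) (window_h : Int) (out : Int) : Decidable (Spec_compute_nb_of_features window_w window_h out) := by unfold Spec_compute_nb_of_features; infer_instance

-- ===== CLAIM (what is proved, stated in full; the proofs are below) =====
def Claim_equal_compute_nb_of_features : Prop := ∀ (window_w : Int) (window_h : Int), Dom_compute_nb_of_features window_w window_h → Spec_compute_nb_of_features window_w window_h (compute_nb_of_features window_w window_h)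

-- ===== LEMMAS AND PROOFS =====

-- a constant-increment loop adds length * c
theorem pv_foldl_const_add {β : Type} (l : List β) (c a : Int) :
    l.foldl (fun acc _ => acc + c) a = a + l.length * c := by
  rw [PySem.List.foldl_add l (fun _ => c) a, PySem.List.sum_map_const_int]

-- Gauss-style sum, doubled to stay division-free
theorem pv_gauss (w : Int) (n : Nat) :
    2 * ((List.range n).map (fun k : Nat => w - 2 - 3 * (k : Int))).sum
      = 2 * n * (w - 2) - 3 * n * n + 3 * n := by
  induction n with
  | zero => simp
  | succ n ih =>
    rw [List.range_succ, List.map_append, List.sum_append]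
    simp only [List.map_cons, List.map_nil, List.sum_cons, List.sum_nil]
    push_cast
    push_cast at ih
    ring_nf
    ring_nf at ih
    linarith [ih]

-- the inner sum over one dimension equals B's closed form
theorem pv_series (w : Int) :
    ((PySem.List.pyRange 3 w 3).map (fun b => ((w - b + 1 - 0).toNat : Int))).sum
      = pvSeriesSum w := by
  rw [PySem.List.pyRange_of_pos 3 w (by norm_num : (0:Int) < 3)]
  by_cases h : w ≤ 3
  · rw [if_neg (by omega), pvSeriesSum, if_pos h]
    simp
  · have h3 : (3:Int) < w := by omega
    rw [if_pos h3]
    have hdm := Int.mul_ediv_add_emod (w - 1) 3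
    have hr0 := Int.emod_nonneg (w - 1) (by norm_num : (3:Int) ≠ 0)
    have hrlt := Int.emod_lt_of_pos (w - 1) (by norm_num : (0:Int) < 3)
    set m : Int := (w - 1) / 3 with hm
    have hmpos : 1 ≤ m := by
      have : (3:Int) ≤ w - 1 := by omega
      omega
    have hn : (w - 3 + 3 - 1) / 3 = m := by
      have : w - 3 + 3 - 1 = w - 1 := by ring
      rw [this]
    rw [hn]
    have hnm : ((m.toNat : Int)) = m := Int.toNat_of_nonneg (by omega)
    -- rewrite each summand into w - 2 - 3k
    have hmap : (List.map (fun k : Nat => 3 + 3 * (k : Int)) (List.range m.toNat)).map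
        (fun b => ((w - b + 1 - 0).toNat : Int))
        = (List.range m.toNat).map (fun k : Nat => w - 2 - 3 * (k : Int)) := by
      rw [List.map_map]
      refine List.map_congr_left ?_
      intro k hk
      have hk' : (k : Int) < m := by
        have := List.mem_range.mp hk
        omega
      have hb : 3 + 3 * (k : Int) ≤ w - 1 := by
        have : 3 * ((k : Int) + 1) ≤ 3 * m := by omega
        omega
      simp only [Function.comp]
      have : (w - (3 + 3 * (k : Int)) + 1 - 0) = w - 2 - 3 * (k : Int) := by ring
      rw [this, Int.toNat_of_nonneg (by omega)]
    rw [hmap]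
    -- finish with the doubled Gauss sum and evenness of m*(m+1)
    have hg := pv_gauss w m.toNat
    rw [hnm] at hg
    rw [pvSeriesSum, if_neg (by omega)]
    have hfd : PySem.Int.floordiv (w - 1) 3 = m := by
      rw [PySem.Int.floordiv_eq_ediv_of_pos (by norm_num : (0:Int) < 3)]
    rw [hfd]
    have heven : (2:Int) ∣ 3 * m * (m + 1) := by
      rcases Int.even_mul_succ_self m with ⟨t, ht⟩
      exact ⟨3 * t, by linarith⟩
    have hq : PySem.Int.floordiv (3 * m * (m + 1)) 2 * 2 = 3 * m * (m + 1) := by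
      rw [PySem.Int.floordiv_eq_ediv_of_pos (by norm_num : (0:Int) < 2)]
      exact Int.ediv_mul_cancel heven
    set q : Int := PySem.Int.floordiv (3 * m * (m + 1)) 2
    nlinarith [hg, hq]

-- ===== VERDICT (by name: the statement is the Claim_ definition above) =====
theorem compute_nb_of_features_spec : Claim_equal_compute_nb_of_features := by
  intro W H _
  unfold Spec_compute_nb_of_features compute_nb_of_features compute_nb_of_features_alt
  -- collapse the two innermost offset loops into a product of lengths
  have hinner : ∀ (bw bh a : Int),
      (PySem.List.pyRange 0 (W - bw + 1) 1).foldl (fun acc _ =>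
        (PySem.List.pyRange 0 (H - bh + 1) 1).foldl (fun acc _ => acc + 1) acc) a
      = a + ((W - bw + 1 - 0).toNat : Int) * (((H - bh + 1 - 0).toNat : Int) * 1) := by
    intro bw bh a
    have : (fun (acc : Int) (_ : Int) =>
        (PySem.List.pyRange 0 (H - bh + 1) 1).foldl (fun acc _ => acc + 1) acc)
        = (fun (acc : Int) (_ : Int) => acc + ((H - bh + 1 - 0).toNat : Int) * 1) := by
      funext acc x
      rw [pv_foldl_const_add, PySem.List.length_pyRange_one]
    rw [this, pv_foldl_const_add, PySem.List.length_pyRange_one]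
  -- turn each loop level into a sum, then factor
  have hmid : ∀ (bw a : Int),
      (PySem.List.pyRange 3 H 3).foldl (fun acc bh =>
        (PySem.List.pyRange 0 (W - bw + 1) 1).foldl (fun acc _ =>
          (PySem.List.pyRange 0 (H - bh + 1) 1).foldl (fun acc _ => acc + 1) acc) acc) a
      = a + ((W - bw + 1 - 0).toNat : Int) *
          ((PySem.List.pyRange 3 H 3).map (fun bh => ((H - bh + 1 - 0).toNat : Int))).sum := by
    intro bw a
    have : (fun (acc bh : Int) =>
        (PySem.List.pyRange 0 (W - bw + 1) 1).foldl (fun acc _ =>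
          (PySem.List.pyRange 0 (H - bh + 1) 1).foldl (fun acc _ => acc + 1) acc) acc)
        = (fun (acc bh : Int) => acc +
            ((W - bw + 1 - 0).toNat : Int) * (((H - bh + 1 - 0).toNat : Int) * 1)) := by
      funext acc bh
      exact hinner bw bh acc
    rw [this, PySem.List.foldl_add]
    simp [List.sum_map_mul_left, mul_comm]
  have houter :
      (PySem.List.pyRange 3 W 3).foldl (fun acc bw =>
        (PySem.List.pyRange 3 H 3).foldl (fun acc bh =>
          (PySem.List.pyRange 0 (W - bw + 1) 1).foldl (fun acc _ =>
            (PySem.List.pyRange 0 (H - bh + 1) 1).foldl (fun acc _ => acc + 1) acc) acc) acc) 0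
      = ((PySem.List.pyRange 3 W 3).map (fun bw => ((W - bw + 1 - 0).toNat : Int))).sum *
        ((PySem.List.pyRange 3 H 3).map (fun bh => ((H - bh + 1 - 0).toNat : Int))).sum := by
    have : (fun (acc bw : Int) =>
        (PySem.List.pyRange 3 H 3).foldl (fun acc bh =>
          (PySem.List.pyRange 0 (W - bw + 1) 1).foldl (fun acc _ =>
            (PySem.List.pyRange 0 (H - bh + 1) 1).foldl (fun acc _ => acc + 1) acc) acc) acc)
        = (fun (acc bw : Int) => acc + ((W - bw + 1 - 0).toNat : Int) *
            ((PySem.List.pyRange 3 H 3).map (fun bh => ((H - bh + 1 - 0).toNat : Int))).sum) := by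
      funext acc bw
      exact hmid bw acc
    rw [this, PySem.List.foldl_add]
    simp [List.sum_map_mul_right]
  rw [houter, pv_series, pv_series]
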